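-- pv_equiv track=rewrite | github.com/jjjhenriksen/grand-bethel-dashboard | src/program_patches.py | _matches_event_title
-- ===== SOURCE A (Python) =====
-- SHORT_TITLE_EQUIVALENTS = {
--     "Officer Practice": "Practice with the 2025-2026 Grand Bethel Officers",
--     "Arts & Crafts Turn-In Deadline": "Deadline for turning in Arts & Crafts Competition Items",
--     "Arts & Crafts Turn-In": "Turn in Arts & Crafts Competition Items",
--     "Sew & Show Turn-In and Judging": "Sew and Show Turn in and Judging",
--     "Flag Ceremony Practice": "Flag Ceremony Practice (member & chaperone)",
--     "Pre-Opening": "Pre-Opening Festivities",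
--     "Officer Entrance": "Entrance of the 2025-2026 Grand Bethel Officers",
--     "Escort of Honored Queens": "Escort of Honored Queens and Senior Princesses Formal",
--     "Introduce MCJD Contestants": "Introduction of Miss California Job’s Daughter Contestants",
--     "Eligible Bethels Drawing": "Drawing for Bethels eligible for 2027-2028 Grand Bethel Officer",
--     "Retiring/Closing Ceremonies": "Retiring/Closing ceremonies for the 2025-2026 Grand Bethel Officers",
--     "Officer Announcement": "Announcement of 2026-2027 Grand Bethel Officers Livestream",
--     "Officer Luncheon": "2025-26 and 2026-27 Grand Bethel Officers Luncheon",
--     "Arts & Crafts Viewing": "Arts & Crafts Competition Room open for viewing",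
--     "Arts & Crafts Pickup": "Pick up Arts & Crafts Competition items",
--     "Adventure Park Private Event": "Adventure Park Private Event Casual Attire GB Session T-shirts are available for pre purchase",
--     "With Bethel Guardian or Exec BGC": "(with Bethel Guardian OR member of the Executive BGC)",
-- }
--
-- def _normalize_title(value: str) -> str:
--     return " ".join(str(value or "").strip().lower().split())
--
-- def _matches_event_title(block_title: str, patch_title: str) -> bool:
--     normalized_patch = _normalize_title(patch_title)
--     normalized_block = _normalize_title(block_title)
--     if not normalized_patch or not normalized_block:
--         return False
--     if normalized_patch == normalized_block:
--         return True
--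
--     raw_equivalent = SHORT_TITLE_EQUIVALENTS.get(str(patch_title).strip(), "")
--     if raw_equivalent and _normalize_title(raw_equivalent) == normalized_block:
--         return True
--
--     for short_title, raw_title in SHORT_TITLE_EQUIVALENTS.items():
--         if _normalize_title(raw_title) == normalized_block and _normalize_title(short_title) == normalized_patch:
--             return True
--     return False
-- ===== SOURCE B (Python) =====
-- SHORT_TITLE_EQUIVALENTS = {
--     "Officer Practice": "Practice with the 2025-2026 Grand Bethel Officers",
--     "Arts & Crafts Turn-In Deadline": "Deadline for turning in Arts & Crafts Competition Items",
--     "Arts & Crafts Turn-In": "Turn in Arts & Crafts Competition Items",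
--     "Sew & Show Turn-In and Judging": "Sew and Show Turn in and Judging",
--     "Flag Ceremony Practice": "Flag Ceremony Practice (member & chaperone)",
--     "Pre-Opening": "Pre-Opening Festivities",
--     "Officer Entrance": "Entrance of the 2025-2026 Grand Bethel Officers",
--     "Escort of Honored Queens": "Escort of Honored Queens and Senior Princesses Formal",
--     "Introduce MCJD Contestants": "Introduction of Miss California Job\u2019s Daughter Contestants",
--     "Eligible Bethels Drawing": "Drawing for Bethels eligible for 2027-2028 Grand Bethel Officer",
--     "Retiring/Closing Ceremonies": "Retiring/Closing ceremonies for the 2025-2026 Grand Bethel Officers",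
--     "Officer Announcement": "Announcement of 2026-2027 Grand Bethel Officers Livestream",
--     "Officer Luncheon": "2025-26 and 2026-27 Grand Bethel Officers Luncheon",
--     "Arts & Crafts Viewing": "Arts & Crafts Competition Room open for viewing",
--     "Arts & Crafts Pickup": "Pick up Arts & Crafts Competition items",
--     "Adventure Park Private Event": "Adventure Park Private Event Casual Attire GB Session T-shirts are available for pre purchase",
--     "With Bethel Guardian or Exec BGC": "(with Bethel Guardian OR member of the Executive BGC)",
-- }
--
--
-- def _normalize_title(value: str) -> str:
--     return " ".join(str(value or "").strip().lower().split())
--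
--
-- # Reverse index built once: normalized raw title -> set of normalized short titles.
-- _INDEX = {}
-- for _short, _raw in SHORT_TITLE_EQUIVALENTS.items():
--     _INDEX.setdefault(_normalize_title(_raw), set()).add(_normalize_title(_short))
--
--
-- def _matches_event_title(block_title: str, patch_title: str) -> bool:
--     normalized_patch = _normalize_title(patch_title)
--     normalized_block = _normalize_title(block_title)
--     if not normalized_patch or not normalized_block:
--         return False
--     return normalized_patch == normalized_block or normalized_patch in _INDEX.get(
--         normalized_block, set()
--     )
-- ===== Notes on version B (the rewrite author's own statement) =====
-- stated objective: simpler
-- what changed: B precomputes once a reverse index from normalized raw title to the set of normalized short titles and replaces A's per-call .get probe plus linear scan of SHORT_TITLE_EQUIVALENTS by a single index lookup (the .get branch is subsumed by the scan).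
import Mathlib
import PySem

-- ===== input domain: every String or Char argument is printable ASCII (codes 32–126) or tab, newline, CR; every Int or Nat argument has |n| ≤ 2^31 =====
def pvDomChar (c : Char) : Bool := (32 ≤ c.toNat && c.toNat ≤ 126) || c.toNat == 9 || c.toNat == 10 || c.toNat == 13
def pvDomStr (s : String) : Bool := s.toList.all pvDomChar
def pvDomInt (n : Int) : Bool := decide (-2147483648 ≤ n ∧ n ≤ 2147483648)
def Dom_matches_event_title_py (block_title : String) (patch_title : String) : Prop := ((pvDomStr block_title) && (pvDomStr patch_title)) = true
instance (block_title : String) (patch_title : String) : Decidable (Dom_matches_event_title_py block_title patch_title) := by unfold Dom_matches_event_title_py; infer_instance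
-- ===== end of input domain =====

-- B replaces A's per-call `.get` probe + linear scan of SHORT_TITLE_EQUIVALENTS by a reverse index
-- (normalized raw title -> set of normalized short titles) built once, so each call is one lookup (objective: simpler).

-- shared module-level constant SHORT_TITLE_EQUIVALENTS (a dict literal with distinct keys)
def shortTitleEquivalents : PySem.Dict String String := PySem.Dict.mk [
  ("Officer Practice", "Practice with the 2025-2026 Grand Bethel Officers"),
  ("Arts & Crafts Turn-In Deadline", "Deadline for turning in Arts & Crafts Competition Items"),
  ("Arts & Crafts Turn-In", "Turn in Arts & Crafts Competition Items"),
  ("Sew & Show Turn-In and Judging", "Sew and Show Turn in and Judging"),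
  ("Flag Ceremony Practice", "Flag Ceremony Practice (member & chaperone)"),
  ("Pre-Opening", "Pre-Opening Festivities"),
  ("Officer Entrance", "Entrance of the 2025-2026 Grand Bethel Officers"),
  ("Escort of Honored Queens", "Escort of Honored Queens and Senior Princesses Formal"),
  ("Introduce MCJD Contestants", "Introduction of Miss California Job’s Daughter Contestants"),
  ("Eligible Bethels Drawing", "Drawing for Bethels eligible for 2027-2028 Grand Bethel Officer"),
  ("Retiring/Closing Ceremonies", "Retiring/Closing ceremonies for the 2025-2026 Grand Bethel Officers"),
  ("Officer Announcement", "Announcement of 2026-2027 Grand Bethel Officers Livestream"),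
  ("Officer Luncheon", "2025-26 and 2026-27 Grand Bethel Officers Luncheon"),
  ("Arts & Crafts Viewing", "Arts & Crafts Competition Room open for viewing"),
  ("Arts & Crafts Pickup", "Pick up Arts & Crafts Competition items"),
  ("Adventure Park Private Event", "Adventure Park Private Event Casual Attire GB Session T-shirts are available for pre purchase"),
  ("With Bethel Guardian or Exec BGC", "(with Bethel Guardian OR member of the Executive BGC)")]

-- shared module helper _normalize_title; `str(value or "")` is `value` itself for a str argument ("" stays "")
def normTitle (value : String) : String :=
  PySem.Str.join " " (PySem.Str.split₀ (PySem.Str.lower (PySem.Str.strip value)))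

-- ===== PORT A =====
def matches_event_title_py (block_title : String) (patch_title : String) : Bool :=
  let normalized_patch := normTitle patch_title
  let normalized_block := normTitle block_title
  if normalized_patch == "" || normalized_block == "" then false
  else if normalized_patch == normalized_block then true
  else
    -- raw_equivalent = SHORT_TITLE_EQUIVALENTS.get(str(patch_title).strip(), "")
    let raw_equivalent := shortTitleEquivalents.getD (PySem.Str.strip patch_title) ""
    if raw_equivalent != "" && (normTitle raw_equivalent == normalized_block) then true
    else
      -- for short_title, raw_title in SHORT_TITLE_EQUIVALENTS.items(): … return True / return False
      shortTitleEquivalents.items.any (fun kv =>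
        normTitle kv.2 == normalized_block && normTitle kv.1 == normalized_patch)

-- ===== PORT B =====
-- _INDEX built once: _INDEX.setdefault(norm(raw), set()).add(norm(short)) is d.modify (norm raw) ∅ (·.add (norm short))
def altIndex : PySem.Dict String (PySem.Set String) :=
  shortTitleEquivalents.items.foldl
    (fun d kv => d.modify (normTitle kv.2) PySem.Set.empty (fun s => PySem.Set.add s (normTitle kv.1)))
    PySem.Dict.empty

def matches_event_title_py_alt (block_title : String) (patch_title : String) : Bool :=
  let normalized_patch := normTitle patch_title
  let normalized_block := normTitle block_title
  if normalized_patch == "" || normalized_block == "" then false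
  else
    normalized_patch == normalized_block ||
      PySem.Set.contains (altIndex.getD normalized_block PySem.Set.empty) normalized_patch

-- ===== PRECONDITION & SPEC =====
def Spec_matches_event_title_py (block_title : String) (patch_title : String) (out : Bool) : Prop := out = matches_event_title_py_alt block_title patch_title
instance (block_title : String) (patch_title : String) (out : Bool) : Decidable (Spec_matches_event_title_py block_title patch_title out) := by unfold Spec_matches_event_title_py; infer_instance

-- ===== CLAIM (what is proved, stated in full; the proofs are below) =====
def Claim_equal_matches_event_title_py : Prop := ∀ (block_title : String) (patch_title : String), Dom_matches_event_title_py block_title patch_title → Spec_matches_event_title_py block_title patch_title (matches_event_title_py block_title patch_title)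

-- ===== LEMMAS AND PROOFS =====

-- a prefix of a list whose leading whitespace is already gone has no leading whitespace either
lemma dropWhile_prefix_eq (p : Char → Bool) (t u : List Char)
    (ht : List.dropWhile p t = t) (hu : u <+: t) : List.dropWhile p u = u := by
  cases u with
  | nil => simp
  | cons a u' =>
    obtain ⟨r, hr⟩ := hu
    have hpa : p a = false := by
      by_contra h
      have hpa : p a = true := by simpa using h
      subst hr
      have := congrArg List.length ht
      simp only [List.cons_append] at this
      rw [List.dropWhile_cons_of_pos hpa] at this
      have hle := List.length_dropWhile_le p (u' ++ r)
      simp only [List.length_cons] at this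
      omega
    simp [List.dropWhile_cons_of_neg, hpa]

lemma rstrip_prefix (t : List Char) : PySem.Chars.rstrip t <+: t := by
  have h := List.dropWhile_suffix (l := t.reverse) PySem.Chars.isspace
  have := List.reverse_prefix.mpr h
  simpa [PySem.Chars.rstrip] using this

lemma chars_strip_strip (s : List Char) :
    PySem.Chars.strip (PySem.Chars.strip s) = PySem.Chars.strip s := by
  unfold PySem.Chars.strip
  set t := PySem.Chars.lstrip s with htdef
  have h1 : List.dropWhile PySem.Chars.isspace t = t := by
    simpa [PySem.Chars.lstrip, htdef] using List.dropWhile_idempotent PySem.Chars.isspace s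
  have h2 : PySem.Chars.lstrip (PySem.Chars.rstrip t) = PySem.Chars.rstrip t := by
    exact dropWhile_prefix_eq _ t _ h1 (rstrip_prefix t)
  rw [h2]
  simp [PySem.Chars.rstrip, List.dropWhile_idempotent]

lemma str_strip_strip (s : String) : PySem.Str.strip (PySem.Str.strip s) = PySem.Str.strip s := by
  apply String.toList_inj.mp
  simp [chars_strip_strip]

lemma norm_strip (s : String) : normTitle (PySem.Str.strip s) = normTitle s := by
  unfold normTitle
  rw [str_strip_strip]

-- membership in the reverse index built by the fold
lemma mem_index_foldl (l : List (String × String)) (d : PySem.Dict String (PySem.Set String))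
    (np nb : String) :
    (np ∈ (l.foldl (fun d kv => d.modify (normTitle kv.2) PySem.Set.empty
        (fun s => PySem.Set.add s (normTitle kv.1))) d).getD nb PySem.Set.empty)
    ↔ (np ∈ d.getD nb PySem.Set.empty ∨ ∃ kv ∈ l, normTitle kv.2 = nb ∧ normTitle kv.1 = np) := by
  induction l generalizing d with
  | nil => simp
  | cons kv t ih =>
    rw [List.foldl_cons, ih]
    rw [PySem.Dict.getD_modify]
    rcases eq_or_ne nb (normTitle kv.2) with hb | hb
    · subst hb
      rw [if_pos rfl, PySem.Set.mem_add]
      simp only [List.mem_cons]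
      aesop
    · rw [if_neg hb]
      simp only [List.mem_cons]
      aesop

lemma mem_altIndex (np nb : String) :
    PySem.Set.contains (altIndex.getD nb PySem.Set.empty) np = true
    ↔ ∃ kv ∈ shortTitleEquivalents.items, normTitle kv.2 = nb ∧ normTitle kv.1 = np := by
  rw [PySem.Set.contains_iff]
  unfold altIndex
  rw [mem_index_foldl]
  simp [PySem.Dict.getD_empty, PySem.Set.empty]

-- ===== VERDICT (by name: the statement is the Claim_ definition above) =====
theorem matches_event_title_py_spec : Claim_equal_matches_event_title_py := by
  intro block_title patch_title _
  unfold Spec_matches_event_title_py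
  simp only [matches_event_title_py, matches_event_title_py_alt]
  set np := normTitle patch_title with hnp
  set nb := normTitle block_title with hnb
  by_cases hguard : (np == "" || nb == "") = true
  · rw [if_pos hguard, if_pos hguard]
  · rw [if_neg hguard, if_neg hguard]
    by_cases heq : (np == nb) = true
    · rw [if_pos heq, heq, Bool.true_or]
    · rw [if_neg heq, Bool.eq_false_iff.mpr heq, Bool.false_or]
      -- the call-time scan of A equals B's one index lookup
      have hany : (shortTitleEquivalents.items.any (fun kv =>
          normTitle kv.2 == nb && normTitle kv.1 == np))
          = PySem.Set.contains (altIndex.getD nb PySem.Set.empty) np := by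
        rw [Bool.eq_iff_iff, List.any_eq_true, mem_altIndex]
        constructor
        · rintro ⟨kv, hm, h⟩
          obtain ⟨h1, h2⟩ : (normTitle kv.2 == nb) = true ∧ (normTitle kv.1 == np) = true := by
            simpa using h
          exact ⟨kv, hm, by simpa using h1, by simpa using h2⟩
        · rintro ⟨kv, hm, h1, h2⟩
          exact ⟨kv, hm, by simp [h1, h2]⟩
      by_cases hbr : ((shortTitleEquivalents.getD (PySem.Str.strip patch_title) "" != "")
          && (normTitle (shortTitleEquivalents.getD (PySem.Str.strip patch_title) "") == nb)) = true
      · rw [if_pos hbr]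
        -- the .get branch is subsumed by the scan: the found pair itself passes B's index lookup
        obtain ⟨hne, hnorm⟩ : (shortTitleEquivalents.getD (PySem.Str.strip patch_title) "" != "") = true
            ∧ (normTitle (shortTitleEquivalents.getD (PySem.Str.strip patch_title) "") == nb) = true := by
          simpa using hbr
        rcases hget : shortTitleEquivalents.get? (PySem.Str.strip patch_title) with _ | raw
        · rw [PySem.Dict.getD_eq_get?_getD, hget] at hne; simp at hne
        · have hmem := PySem.Dict.mem_items_of_get?_eq_some _ hget
          have hraw : shortTitleEquivalents.getD (PySem.Str.strip patch_title) "" = raw := by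
            rw [PySem.Dict.getD_eq_get?_getD, hget]; rfl
          rw [hraw] at hnorm
          have hc : PySem.Set.contains (altIndex.getD nb PySem.Set.empty) np = true := by
            rw [mem_altIndex]
            exact ⟨(PySem.Str.strip patch_title, raw), hmem, by simpa using hnorm,
                   by rw [hnp]; exact norm_strip patch_title⟩
          exact hc.symm
      · rw [if_neg hbr]; exact hany
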